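-- pv_equiv track=rewrite | github.com/Azonix07/gamespotbooking-v1 | backend_python/services/ai_assistant_selfhosted.py | _determine_action_from_progress
-- ===== SOURCE A (Python) =====
-- from typing import Dict, List, Optional, Tuple
--
-- def _determine_action_from_progress(booking_progress: Dict) -> str:
--     """Determine next action based on booking completion"""
--     required_fields = ['device', 'date', 'time', 'duration', 'players', 'phone']
--     filled = [f for f in required_fields if booking_progress.get(f)]
--
--     if len(filled) == 0:
--         return 'initial_inquiry'
--     elif len(filled) < 3:
--         return 'collecting_details'
--     elif len(filled) < len(required_fields):
--         return 'almost_complete'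
--     else:
--         return 'ready_to_book'
-- ===== SOURCE B (Python) =====
-- def _has_at_least(n, booking_progress, fields):
--     """True iff at least n of the given fields are truthy; stops scanning early."""
--     for f in fields:
--         if booking_progress.get(f):
--             n -= 1
--             if n == 0:
--                 return True
--     return False
--
--
-- def _determine_action_from_progress(booking_progress):
--     """Determine next action based on booking completion"""
--     fields = ('device', 'date', 'time', 'duration', 'players', 'phone')
--     if not _has_at_least(1, booking_progress, fields):
--         return 'initial_inquiry'
--     if not _has_at_least(3, booking_progress, fields):
--         return 'collecting_details'
--     if not _has_at_least(6, booking_progress, fields):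
--         return 'almost_complete'
--     return 'ready_to_book'
-- ===== Notes on version B (the rewrite author's own statement) =====
-- stated objective: alternative
-- what changed: Instead of materialising the filled-field list and branching on its length, B answers three short-circuiting threshold predicates (at least 1 / at least 3 / all 6 fields truthy), each an early-exit scan that never computes the full count.
import Mathlib
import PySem

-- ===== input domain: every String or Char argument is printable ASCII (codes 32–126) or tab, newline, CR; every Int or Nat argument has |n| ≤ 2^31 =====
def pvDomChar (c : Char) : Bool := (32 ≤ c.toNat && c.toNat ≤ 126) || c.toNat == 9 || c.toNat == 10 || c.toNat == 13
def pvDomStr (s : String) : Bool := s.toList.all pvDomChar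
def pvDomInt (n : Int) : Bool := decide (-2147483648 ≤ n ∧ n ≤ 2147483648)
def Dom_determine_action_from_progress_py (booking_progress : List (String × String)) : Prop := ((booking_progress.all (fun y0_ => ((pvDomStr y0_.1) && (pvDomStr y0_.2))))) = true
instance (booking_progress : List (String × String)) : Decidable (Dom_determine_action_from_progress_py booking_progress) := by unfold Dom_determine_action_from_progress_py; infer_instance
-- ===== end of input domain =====

-- B replaces A's filled-list construction + if/elif ladder on its length by three
-- short-circuiting threshold scans (at least 1 / at least 3 / all 6 truthy) that never
-- compute the full count (objective: alternative).

-- ===== PORT A =====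
-- truthiness of booking_progress.get(f): missing key and "" are falsy, any other string truthy
def pyTruthyField (d : PySem.Dict String String) (f : String) : Bool :=
  (PySem.Dict.getD d f "") != ""

def determine_action_from_progress_py (booking_progress : List (String × String)) : String :=
  let d := PySem.Dict.ofList booking_progress
  let required_fields := ["device", "date", "time", "duration", "players", "phone"]
  let filled := required_fields.filter (fun f => pyTruthyField d f)
  if filled.length == 0 then "initial_inquiry"
  else if filled.length < 3 then "collecting_details"
  else if filled.length < required_fields.length then "almost_complete"
  else "ready_to_book"

-- ===== PORT B =====
-- _has_at_least: early-exit scan, decrementing n and stopping as soon as it hits 0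
def hasAtLeast (d : PySem.Dict String String) : Int → List String → Bool
  | _, [] => false
  | n, f :: fs =>
      if pyTruthyField d f then
        if n - 1 == 0 then true else hasAtLeast d (n - 1) fs
      else hasAtLeast d n fs

def determine_action_from_progress_py_alt (booking_progress : List (String × String)) : String :=
  let d := PySem.Dict.ofList booking_progress
  let fields := ["device", "date", "time", "duration", "players", "phone"]
  if !(hasAtLeast d 1 fields) then "initial_inquiry"
  else if !(hasAtLeast d 3 fields) then "collecting_details"
  else if !(hasAtLeast d 6 fields) then "almost_complete"
  else "ready_to_book"

-- ===== PRECONDITION & SPEC =====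
def Spec_determine_action_from_progress_py (booking_progress : List (String × String)) (out : String) : Prop := out = determine_action_from_progress_py_alt booking_progress
instance (booking_progress : List (String × String)) (out : String) : Decidable (Spec_determine_action_from_progress_py booking_progress out) := by unfold Spec_determine_action_from_progress_py; infer_instance

-- ===== CLAIM (what is proved, stated in full; the proofs are below) =====
def Claim_equal_determine_action_from_progress_py : Prop := ∀ (booking_progress : List (String × String)), Dom_determine_action_from_progress_py booking_progress → Spec_determine_action_from_progress_py booking_progress (determine_action_from_progress_py booking_progress)

-- ===== LEMMAS AND PROOFS =====

-- ===== VERDICT (by name: the statement is the Claim_ definition above) =====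
theorem determine_action_from_progress_py_spec : Claim_equal_determine_action_from_progress_py := by
  intro bp _
  unfold Spec_determine_action_from_progress_py
  cases h1 : pyTruthyField (PySem.Dict.ofList bp) "device" <;>
  cases h2 : pyTruthyField (PySem.Dict.ofList bp) "date" <;>
  cases h3 : pyTruthyField (PySem.Dict.ofList bp) "time" <;>
  cases h4 : pyTruthyField (PySem.Dict.ofList bp) "duration" <;>
  cases h5 : pyTruthyField (PySem.Dict.ofList bp) "players" <;>
  cases h6 : pyTruthyField (PySem.Dict.ofList bp) "phone" <;>
  simp [determine_action_from_progress_py, determine_action_from_progress_py_alt,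
    hasAtLeast, List.filter, h1, h2, h3, h4, h5, h6]
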